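-- pv_equiv track=rewrite | github.com/HyunBin-Jang/Algorithm_Team5 | suffix_array/suffix_array_algorithm.py | rebuild_mammoth_with_aligned_reads
-- ===== SOURCE A (Python) =====
-- def rebuild_mammoth_with_aligned_reads(reference: str, reads: list, alignments: dict) -> str:
--     reference_list = list(reference)
--     if not reads:
--         return reference
--
--     read_len = len(reads[0])
--
--     for i, read in enumerate(reads):
--         pos = alignments.get(i, -1)
--         if pos < 0:
--             continue
--         # reference의 해당 위치를 read로 덮어씀
--         for j, base in enumerate(read):
--             if pos + j < len(reference_list):
--                 reference_list[pos + j] = base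
--
--     return "".join(reference_list)
-- ===== SOURCE B (Python) =====
-- def rebuild_mammoth_with_aligned_reads(reference: str, reads: list, alignments: dict) -> str:
--     if not reads:
--         return reference
--     reference_list = list(reference)
--     for i, read in enumerate(reads):
--         pos = alignments.get(i, -1)
--         if pos >= 0:
--             k = min(len(read), len(reference_list) - pos)
--             if k > 0:
--                 reference_list[pos:pos + k] = read[:k]
--     return "".join(reference_list)
-- ===== Notes on version B (the rewrite author's own statement) =====
-- stated objective: simpler
-- what changed: Replaces A's inner per-character loop with its per-element bounds check by one arithmetically truncated bulk slice assignment per read.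
import Mathlib
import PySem

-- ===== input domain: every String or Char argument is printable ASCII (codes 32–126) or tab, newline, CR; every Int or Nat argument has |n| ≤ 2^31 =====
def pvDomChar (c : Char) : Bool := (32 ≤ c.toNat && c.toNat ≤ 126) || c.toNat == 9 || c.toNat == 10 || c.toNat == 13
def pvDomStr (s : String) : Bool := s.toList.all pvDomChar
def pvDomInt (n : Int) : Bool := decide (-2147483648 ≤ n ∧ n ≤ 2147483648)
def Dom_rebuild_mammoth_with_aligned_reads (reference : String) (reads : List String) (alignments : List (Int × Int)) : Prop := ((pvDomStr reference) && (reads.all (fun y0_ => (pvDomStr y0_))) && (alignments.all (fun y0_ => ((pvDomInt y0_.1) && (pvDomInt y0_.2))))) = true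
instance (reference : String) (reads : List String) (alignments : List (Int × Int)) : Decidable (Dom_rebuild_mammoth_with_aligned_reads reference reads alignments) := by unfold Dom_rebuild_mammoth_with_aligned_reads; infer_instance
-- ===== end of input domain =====

-- B replaces A's inner per-character write loop by one bulk slice assignment per read
-- (truncation computed arithmetically); objective: simpler. Return-value equivalence only:
-- neither program mutates its arguments.

-- ===== PORT A =====
-- for j, base in enumerate(read): if pos + j < len(reference_list): reference_list[pos+j] = base
def rebuild_mammoth_with_aligned_reads (reference : String) (reads : List String) (alignments : List (Int × Int)) : String :=
  let reference_list := reference.toList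
  if reads = [] then reference
  else
    -- read_len := (reads[0]).length  -- computed by A but never used
    let final := (PySem.List.enumerate reads 0).foldl (fun acc p =>
      let pos := (PySem.Dict.mk alignments).getD p.1 (-1)
      if pos < 0 then acc
      else (PySem.List.enumerate p.2.toList 0).foldl (fun acc2 q =>
        if pos + q.1 < (acc2.length : Int) then PySem.List.pySetD acc2 (pos + q.1) q.2
        else acc2) acc) reference_list
    String.mk final

-- ===== PORT B =====
-- reference_list[pos:pos+k] = read[:k]  as  take pos ++ read.take k ++ drop (pos+k)
def rebuild_mammoth_with_aligned_reads_alt (reference : String) (reads : List String) (alignments : List (Int × Int)) : String :=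
  if reads = [] then reference
  else
    let reference_list := reference.toList
    let final := (PySem.List.enumerate reads 0).foldl (fun acc p =>
      let pos := (PySem.Dict.mk alignments).getD p.1 (-1)
      if 0 ≤ pos then
        let k : Int := min (p.2.toList.length : Int) ((acc.length : Int) - pos)
        if 0 < k then acc.take pos.toNat ++ p.2.toList.take k.toNat ++ acc.drop (pos.toNat + k.toNat)
        else acc
      else acc) reference_list
    String.mk final

-- ===== PRECONDITION & SPEC =====
def Spec_rebuild_mammoth_with_aligned_reads (reference : String) (reads : List String) (alignments : List (Int × Int)) (out : String) : Prop := out = rebuild_mammoth_with_aligned_reads_alt reference reads alignments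
instance (reference : String) (reads : List String) (alignments : List (Int × Int)) (out : String) : Decidable (Spec_rebuild_mammoth_with_aligned_reads reference reads alignments out) := by unfold Spec_rebuild_mammoth_with_aligned_reads; infer_instance

-- ===== CLAIM (what is proved, stated in full; the proofs are below) =====
def Claim_equal_rebuild_mammoth_with_aligned_reads : Prop := ∀ (reference : String) (reads : List String) (alignments : List (Int × Int)), Dom_rebuild_mammoth_with_aligned_reads reference reads alignments → Spec_rebuild_mammoth_with_aligned_reads reference reads alignments (rebuild_mammoth_with_aligned_reads reference reads alignments)

-- ===== LEMMAS AND PROOFS =====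

-- Writing c at position p (in range) and splicing the rest one slot later equals splicing c :: rest at p.
theorem pv_set_splice (acc : List Char) (c : Char) (rest : List Char) (p : Nat) (h : p < acc.length) :
    (acc.set p c).take (p+1) ++ rest.take ((acc.set p c).length - (p+1)) ++ (acc.set p c).drop ((p+1) + min rest.length ((acc.set p c).length - (p+1)))
    = acc.take p ++ (c :: rest).take (acc.length - p) ++ acc.drop (p + min (c :: rest).length (acc.length - p)) := by
  have hset : acc.set p c = acc.take p ++ c :: acc.drop (p + 1) := by
    rw [List.set_eq_take_append_cons_drop, if_pos h]
  have hmin : min (c :: rest).length (acc.length - p) = min rest.length (acc.length - (p+1)) + 1 := by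
    simp only [List.length_cons]; omega
  have hLm : acc.length - p = (acc.length - (p+1)) + 1 := by omega
  rw [List.length_set, hset, hmin, hLm]
  have ht : (acc.take p).length = p := by simp [Nat.min_eq_left h.le]
  set m := min rest.length (acc.length - (p+1)) with hm
  simp only [List.take_append, List.drop_append, ht, List.take_take]
  have e1 : min (p + 1) p = p := by omega
  have e2 : p + 1 - p = 1 := by omega
  have e3 : p + 1 + m - p = m + 1 := by omega
  have e4 : List.drop (p + 1 + m) (List.take p acc) = [] :=
    List.drop_eq_nil_of_le (by simp [ht]; omega)
  rw [e1, e2, e3, e4]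
  simp only [List.take_succ_cons, List.take_zero, List.drop_succ_cons, List.drop_drop]
  have e5 : p + 1 + m = p + (m + 1) := by omega
  rw [e5]
  simp

-- A's inner write loop over one read equals a bulk splice of the in-bounds prefix.
theorem pv_inner_splice (cs : List Char) : ∀ (acc : List Char) (pos s : Int) (p : Nat), pos + s = (p : Int) →
    (PySem.List.enumerate cs s).foldl (fun acc2 q =>
        if pos + q.1 < (acc2.length : Int) then PySem.List.pySetD acc2 (pos + q.1) q.2
        else acc2) acc
      = acc.take p ++ cs.take (acc.length - p) ++ acc.drop (p + min cs.length (acc.length - p)) := by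
  induction cs with
  | nil =>
    intro acc pos s p hp
    simp
  | cons c rest ih =>
    intro acc pos s p hp
    rw [PySem.List.enumerate_cons]
    simp only [List.foldl_cons, hp]
    by_cases h : p < acc.length
    · have hlt : (p : Int) < (acc.length : Int) := by exact_mod_cast h
      rw [if_pos hlt, PySem.List.pySetD_natCast]
      rw [ih (acc.set p c) pos (s + 1) (p + 1) (by omega)]
      exact pv_set_splice acc c rest p h
    · have hge : ¬ ((p : Int) < (acc.length : Int)) := by exact_mod_cast h
      rw [if_neg hge]
      rw [ih acc pos (s + 1) (p + 1) (by omega)]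
      have h1 : acc.length - p = 0 := by omega
      have h2 : acc.length - (p + 1) = 0 := by omega
      simp [h1, h2, List.take_of_length_le (le_of_not_gt h), List.drop_eq_nil_of_le (le_of_not_gt h)]

-- ===== VERDICT (by name: the statement is the Claim_ definition above) =====
theorem rebuild_mammoth_with_aligned_reads_spec : Claim_equal_rebuild_mammoth_with_aligned_reads := by
  intro reference reads alignments _
  unfold Spec_rebuild_mammoth_with_aligned_reads
  unfold rebuild_mammoth_with_aligned_reads rebuild_mammoth_with_aligned_reads_alt
  by_cases hr : reads = []
  · simp [hr]
  · simp only [if_neg hr]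
    congr 1
    apply PySem.List.foldl_congr_mem
    intro acc p _
    set pos := (PySem.Dict.mk alignments).getD p.1 (-1) with hpos
    by_cases h0 : pos < 0
    · rw [if_pos h0, if_neg (not_le.mpr h0)]
    · have h0' : 0 ≤ pos := le_of_not_gt h0
      rw [if_neg h0, if_pos h0']
      set cs := p.2.toList with hcs
      have hcast : pos + 0 = ((pos.toNat : Nat) : Int) := by omega
      rw [pv_inner_splice cs acc pos 0 pos.toNat hcast]
      set k : Int := min (cs.length : Int) ((acc.length : Int) - pos) with hk
      by_cases hkpos : 0 < k
      · rw [if_pos hkpos]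
        have h1 : k.toNat = min cs.length (acc.length - pos.toNat) := by omega
        have h2 : cs.take k.toNat = cs.take (acc.length - pos.toNat) := by
          rcases Nat.lt_or_ge (acc.length - pos.toNat) cs.length with h | h
          · rw [h1, Nat.min_eq_right h.le]
          · rw [h1, Nat.min_eq_left h, List.take_length, List.take_of_length_le h]
        rw [h2, h1, List.append_assoc]
      · rw [if_neg hkpos]
        have hd : cs.length = 0 ∨ acc.length ≤ pos.toNat := by omega
        rcases hd with h | h
        · simp [List.eq_nil_of_length_eq_zero h]
        · have h1 : acc.length - pos.toNat = 0 := by omega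
          simp [h1, List.take_of_length_le h, List.drop_eq_nil_of_le h]
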